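-- pv_equiv track=rewrite | github.com/Star-live/algorithm-problems | 哈希表/1995-统计特殊四元组.py | countQuadruplets_1
-- ===== SOURCE A (Python) =====
-- def countQuadruplets_1(nums):
--     n = len(nums)
--     ans = 0
--     for a in range(0, n-3):
--         for b in range(a+1, n-2):
--             for c in range(b+1, n-1):
--                 for d in range(c+1, n):
--                     if nums[a] + nums[b] + nums[c] == nums[d]:
--                         ans += 1
--     return ans
-- ===== SOURCE B (Python) =====
-- def countQuadruplets_1(nums):
--     # Hash-map re-implementation: iterate c ascending, maintain a counter of all
--     # pair sums nums[a]+nums[b] with a<b<c, and for each d>c add the count of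
--     # nums[d]-nums[c].  O(n^2) instead of A's O(n^4).
--     n = len(nums)
--     cnt = {}
--     ans = 0
--     for c in range(2, n - 1):
--         b = c - 1
--         for a in range(0, b):
--             k = nums[a] + nums[b]
--             cnt[k] = cnt.get(k, 0) + 1
--         for d in range(c + 1, n):
--             ans += cnt.get(nums[d] - nums[c], 0)
--     return ans
-- ===== Notes on version B (the rewrite author's own statement) =====
-- stated objective: faster
-- what changed: Replaced the four nested index loops by a single ascending sweep that maintains a hash counter of all pair sums nums[a]+nums[b] with a<b<c and, for each c, adds the counter value at nums[d]-nums[c] for every d>c.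
import Mathlib
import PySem

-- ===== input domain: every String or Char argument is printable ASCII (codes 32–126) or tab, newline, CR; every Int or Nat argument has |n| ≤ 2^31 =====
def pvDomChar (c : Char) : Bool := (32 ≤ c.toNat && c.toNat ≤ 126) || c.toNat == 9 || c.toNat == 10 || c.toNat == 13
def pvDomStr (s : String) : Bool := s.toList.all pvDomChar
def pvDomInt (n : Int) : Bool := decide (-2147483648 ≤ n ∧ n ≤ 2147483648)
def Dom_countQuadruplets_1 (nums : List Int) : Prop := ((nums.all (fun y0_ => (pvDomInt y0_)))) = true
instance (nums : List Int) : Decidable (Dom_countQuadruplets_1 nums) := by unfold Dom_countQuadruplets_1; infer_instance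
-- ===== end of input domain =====

-- B replaces A's four nested index loops by one ascending sweep with a hash counter of pair sums nums[a]+nums[b] (a<b<c), measured asymptotically faster (O(n^2) vs O(n^4)).


-- ===== PORT A =====
def countQuadruplets_1 (nums : List Int) : Int :=
  let n : Int := nums.length
  (PySem.List.pyRange 0 (n-3) 1).foldl (fun ans a =>
    (PySem.List.pyRange (a+1) (n-2) 1).foldl (fun ans b =>
      (PySem.List.pyRange (b+1) (n-1) 1).foldl (fun ans c =>
        (PySem.List.pyRange (c+1) n 1).foldl (fun ans d =>
          if PySem.List.pyGetD nums a 0 + PySem.List.pyGetD nums b 0 + PySem.List.pyGetD nums c 0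
              = PySem.List.pyGetD nums d 0 then ans + 1 else ans) ans) ans) ans) 0

-- ===== PORT B =====
-- one iteration of B's sweep over c: add the pair sums with b = c-1 to the counter, then count the d's
def bstep (nums : List Int) (st : PySem.Dict Int Int × Int) (c : Int) : PySem.Dict Int Int × Int :=
  let n : Int := nums.length
  let b := c - 1
  let cnt := (PySem.List.pyRange 0 b 1).foldl (fun cnt a =>
      let k := PySem.List.pyGetD nums a 0 + PySem.List.pyGetD nums b 0
      cnt.insert k (cnt.getD k 0 + 1)) st.1
  let ans := (PySem.List.pyRange (c+1) n 1).foldl (fun ans d =>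
      ans + cnt.getD (PySem.List.pyGetD nums d 0 - PySem.List.pyGetD nums c 0) 0) st.2
  (cnt, ans)

def countQuadruplets_1_alt (nums : List Int) : Int :=
  let n : Int := nums.length
  ((PySem.List.pyRange 2 (n-1) 1).foldl (bstep nums) (PySem.Dict.empty, 0)).2

-- ===== PRECONDITION & SPEC =====
def Spec_countQuadruplets_1 (nums : List Int) (out : Int) : Prop := out = countQuadruplets_1_alt nums
instance (nums : List Int) (out : Int) : Decidable (Spec_countQuadruplets_1 nums out) := by unfold Spec_countQuadruplets_1; infer_instance

-- ===== CLAIM (what is proved, stated in full; the proofs are below) =====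
def Claim_equal_countQuadruplets_1 : Prop := ∀ (nums : List Int), Dom_countQuadruplets_1 nums → Spec_countQuadruplets_1 nums (countQuadruplets_1 nums)

-- ===== LEMMAS AND PROOFS =====

-- shorthand for nums[i] inside the proofs
def gv (nums : List Int) (i : Int) : Int := PySem.List.pyGetD nums i 0

-- what B's counter holds: the number of pairs a < b < m with nums[a]+nums[b] = v
def pc (nums : List Int) (m : Nat) (v : Int) : Int :=
  ∑ b ∈ Finset.range m, ∑ a ∈ Finset.range b, if gv nums a + gv nums b = v then 1 else 0

-- B's accumulated answer after K iterations of the sweep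
def ansF (nums : List Int) (K : Nat) : Int :=
  ∑ k ∈ Finset.range K,
    ((PySem.List.pyRange (2 + (k:Int) + 1) (nums.length:Int) 1).map
      (fun d => pc nums (k+2) (gv nums d - gv nums (2 + (k:Int))))).sum

-- the common quadruple count, summed in B's order (c, d, b, a)
def quadSum (nums : List Int) : Int :=
  ∑ c ∈ Finset.range nums.length, ∑ d ∈ Finset.range nums.length,
    ∑ b ∈ Finset.range nums.length, ∑ a ∈ Finset.range nums.length,
      if a < b ∧ b < c ∧ c < d ∧ gv nums a + gv nums b + gv nums c = gv nums d then (1:Int) else 0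

lemma listsum_range (f : ℕ → Int) (n : ℕ) : ((List.range n).map f).sum = ∑ i ∈ Finset.range n, f i := by
  induction n with
  | zero => simp
  | succ m ih => rw [List.range_succ, List.map_append, List.sum_append, Finset.sum_range_succ, ih]; simp

lemma sum_pyRange_ite (X : Int → Int) (lo hi : Int) (n : Nat) (h0 : 0 ≤ lo) (hn : hi ≤ (n:Int)) :
    ((PySem.List.pyRange lo hi 1).map X).sum
      = ∑ i ∈ Finset.range n, if lo ≤ (i:Int) ∧ (i:Int) < hi then X i else 0 := by
  rw [PySem.List.pyRange_one, List.map_map, listsum_range]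
  rw [Finset.sum_ite, Finset.sum_const_zero, add_zero]
  rw [show Finset.filter (fun i : ℕ => lo ≤ (i:Int) ∧ (i:Int) < hi) (Finset.range n)
        = Finset.Ico lo.toNat hi.toNat by
      ext i; simp only [Finset.mem_filter, Finset.mem_Ico, Finset.mem_range]; omega]
  rw [Finset.sum_Ico_eq_sum_range]
  rw [show (hi.toNat - lo.toNat) = (hi - lo).toNat by omega]
  exact Finset.sum_congr rfl fun i _ => by simp only [Function.comp]; congr 1; omega

lemma sum_range_trunc (X : Nat → Int) (n m : Nat) (hm : m ≤ n) (hz : ∀ i, m ≤ i → i < n → X i = 0) :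
    ∑ i ∈ Finset.range n, X i = ∑ i ∈ Finset.range m, X i := by
  refine (Finset.sum_subset ?_ ?_).symm
  · intro i hi; simp only [Finset.mem_range] at *; omega
  · intro i hi hni
    simp only [Finset.mem_range] at hi hni
    exact hz i (by omega) hi

lemma sum_range_shift (h : ℕ → Int) (n K s : Nat)
    (hin : ∀ k, k < K → s + k < n)
    (hv : ∀ c, c < n → (c < s ∨ s + K ≤ c) → h c = 0) :
    ∑ c ∈ Finset.range n, h c = ∑ k ∈ Finset.range K, h (s + k) := by
  have hico : ∑ k ∈ Finset.range K, h (s + k) = ∑ i ∈ Finset.Ico s (s + K), h i := by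
    rw [Finset.sum_Ico_eq_sum_range, show s + K - s = K by omega]
  rw [hico]
  cases Nat.eq_zero_or_pos K with
  | inl h0 =>
    subst h0
    simp only [Nat.add_zero, Finset.Ico_self, Finset.sum_empty]
    exact Finset.sum_eq_zero (fun c hc => hv c (by simpa using hc) (by omega))
  | inr hK =>
    refine (Finset.sum_subset ?_ ?_).symm
    · intro i hi
      simp only [Finset.mem_Ico] at hi
      have := hin (K - 1) (by omega)
      simp only [Finset.mem_range]; omega
    · intro i hi hni
      simp only [Finset.mem_range] at hi
      simp only [Finset.mem_Ico] at hni
      exact hv i hi (by omega)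

lemma sum4comm (s : Finset ℕ) (f : ℕ → ℕ → ℕ → ℕ → Int) :
    (∑ a ∈ s, ∑ b ∈ s, ∑ c ∈ s, ∑ d ∈ s, f a b c d)
      = ∑ c ∈ s, ∑ d ∈ s, ∑ b ∈ s, ∑ a ∈ s, f a b c d := calc
  (∑ a ∈ s, ∑ b ∈ s, ∑ c ∈ s, ∑ d ∈ s, f a b c d)
      = ∑ a ∈ s, ∑ c ∈ s, ∑ b ∈ s, ∑ d ∈ s, f a b c d :=
        Finset.sum_congr rfl (fun _ _ => Finset.sum_comm)
  _ = ∑ c ∈ s, ∑ a ∈ s, ∑ b ∈ s, ∑ d ∈ s, f a b c d := Finset.sum_comm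
  _ = ∑ c ∈ s, ∑ a ∈ s, ∑ d ∈ s, ∑ b ∈ s, f a b c d :=
        Finset.sum_congr rfl (fun _ _ => Finset.sum_congr rfl (fun _ _ => Finset.sum_comm))
  _ = ∑ c ∈ s, ∑ d ∈ s, ∑ a ∈ s, ∑ b ∈ s, f a b c d :=
        Finset.sum_congr rfl (fun _ _ => Finset.sum_comm)
  _ = ∑ c ∈ s, ∑ d ∈ s, ∑ b ∈ s, ∑ a ∈ s, f a b c d :=
        Finset.sum_congr rfl (fun _ _ => Finset.sum_congr rfl (fun _ _ => Finset.sum_comm))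

lemma ite_sum_push {P : Prop} [Decidable P] (s : Finset ℕ) (f : ℕ → Int) :
    (if P then (∑ i ∈ s, f i) else 0) = ∑ i ∈ s, if P then f i else 0 := by
  split_ifs <;> simp

-- specialized instances of sum_pyRange_ite (no hypotheses, so simp can rewrite under binders)
lemma levA (X : Int → Int) (m : ℕ) : ((PySem.List.pyRange 0 ((m:Int)-3) 1).map X).sum
    = ∑ i ∈ Finset.range m, if (0:Int) ≤ (i:Int) ∧ (i:Int) < (m:Int)-3 then X i else 0 :=
  sum_pyRange_ite X 0 _ m (by norm_num) (by omega)
lemma levB (X : Int → Int) (a m : ℕ) : ((PySem.List.pyRange ((a:Int)+1) ((m:Int)-2) 1).map X).sum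
    = ∑ i ∈ Finset.range m, if (a:Int)+1 ≤ (i:Int) ∧ (i:Int) < (m:Int)-2 then X i else 0 :=
  sum_pyRange_ite X _ _ m (by omega) (by omega)
lemma levC (X : Int → Int) (b m : ℕ) : ((PySem.List.pyRange ((b:Int)+1) ((m:Int)-1) 1).map X).sum
    = ∑ i ∈ Finset.range m, if (b:Int)+1 ≤ (i:Int) ∧ (i:Int) < (m:Int)-1 then X i else 0 :=
  sum_pyRange_ite X _ _ m (by omega) (by omega)
lemma levD (X : Int → Int) (c m : ℕ) : ((PySem.List.pyRange ((c:Int)+1) (m:Int) 1).map X).sum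
    = ∑ i ∈ Finset.range m, if (c:Int)+1 ≤ (i:Int) ∧ (i:Int) < (m:Int) then X i else 0 :=
  sum_pyRange_ite X _ _ m (by omega) (by omega)

lemma A_eq_quadSum (nums : List Int) : countQuadruplets_1 nums = quadSum nums := by
  unfold countQuadruplets_1
  simp only [PySem.List.foldl_ite_add_one, PySem.List.foldl_add, zero_add]
  simp only [← PySem.List.sum_map_ite_one_zero]
  simp only [levA, levB, levC, levD]
  simp only [ite_sum_push]
  simp only [← ite_and]
  simp only [decide_eq_true_eq]
  rw [sum4comm]
  unfold quadSum
  refine Finset.sum_congr rfl fun c _ => Finset.sum_congr rfl fun d hd =>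
    Finset.sum_congr rfl fun b _ => Finset.sum_congr rfl fun a _ => ?_
  refine if_congr ?_ rfl rfl
  have hdn : d < nums.length := Finset.mem_range.mp hd
  unfold gv
  constructor
  · rintro ⟨h0, ⟨h1, _⟩, ⟨h2, _⟩, ⟨h3, _⟩, hE⟩
    exact ⟨by omega, by omega, by omega, hE⟩
  · rintro ⟨h1, h2, h3, hE⟩
    exact ⟨⟨by omega, by omega⟩, ⟨by omega, by omega⟩, ⟨by omega, by omega⟩, ⟨by omega, by omega⟩, hE⟩

lemma count_eq_ite_sum (v : Int) (L : List Int) :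
    ((L.count v : Nat) : Int) = (L.map (fun x => if x = v then (1:Int) else 0)).sum := by
  induction L with
  | nil => simp
  | cons x t ih => by_cases h : x = v <;> simp [h, ← ih, add_comm]

lemma pc_succ (nums : List Int) (m : ℕ) (v : Int) :
    pc nums (m+1) v = pc nums m v + ∑ a ∈ Finset.range m, (if gv nums a + gv nums m = v then 1 else 0) := by
  unfold pc; rw [Finset.sum_range_succ]

lemma Bloop (nums : List Int) (K : Nat) :
    (∀ v, ((List.range K).foldl (fun (st : PySem.Dict Int Int × Int) (k : ℕ) => bstep nums st (2 + (k:Int))) (PySem.Dict.empty, 0)).1.getD v 0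
        = pc nums (K+1) v)
    ∧ ((List.range K).foldl (fun (st : PySem.Dict Int Int × Int) (k : ℕ) => bstep nums st (2 + (k:Int))) (PySem.Dict.empty, 0)).2
        = ansF nums K := by
  induction K with
  | zero =>
    constructor
    · intro v; simp [pc, PySem.Dict.getD_empty]
    · simp [ansF]
  | succ K ih =>
    obtain ⟨ihc, iha⟩ := ih
    rw [List.range_succ, List.foldl_append, List.foldl_cons, List.foldl_nil]
    set st := (List.range K).foldl (fun (st : PySem.Dict Int Int × Int) (k : ℕ) => bstep nums st (2 + (k:Int))) (PySem.Dict.empty, 0) with hst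
    have hb : (2 + (K:Int) - 1) = ((K+1 : Nat) : Int) := by push_cast; ring
    have hcnt : ∀ v, ((bstep nums st (2 + (K:Int))).1).getD v 0 = pc nums (K+2) v := by
      intro v
      show ((PySem.List.pyRange 0 (2 + (K:Int) - 1) 1).foldl (fun cnt a =>
          cnt.insert (PySem.List.pyGetD nums a 0 + PySem.List.pyGetD nums (2 + (K:Int) - 1) 0)
            (cnt.getD (PySem.List.pyGetD nums a 0 + PySem.List.pyGetD nums (2 + (K:Int) - 1) 0) 0 + 1)) st.1).getD v 0
        = pc nums (K+2) v
      rw [hb]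
      rw [show (PySem.List.pyRange 0 ((K+1 : Nat) : Int) 1).foldl (fun cnt a =>
          cnt.insert (PySem.List.pyGetD nums a 0 + PySem.List.pyGetD nums ((K+1 : Nat) : Int) 0)
            (cnt.getD (PySem.List.pyGetD nums a 0 + PySem.List.pyGetD nums ((K+1 : Nat) : Int) 0) 0 + 1)) st.1
          = ((PySem.List.pyRange 0 ((K+1 : Nat) : Int) 1).map
              (fun a => PySem.List.pyGetD nums a 0 + PySem.List.pyGetD nums ((K+1 : Nat) : Int) 0)).foldl
              (fun d x => d.insert x (d.getD x 0 + 1)) st.1 by rw [List.foldl_map]]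
      rw [PySem.Dict.getD_foldl_insert_add_one]
      rw [ihc]
      rw [count_eq_ite_sum, List.map_map]
      rw [sum_pyRange_ite _ 0 ((K+1 : Nat) : Int) (K+1) (by omega) (by omega)]
      show pc nums (K+1) v + _ = pc nums (K+2) v
      conv_rhs => rw [show K+2 = (K+1)+1 from rfl, pc_succ]
      congr 1
      apply Finset.sum_congr rfl
      intro a ha
      simp only [Finset.mem_range] at ha
      rw [if_pos ⟨by omega, by omega⟩]
      simp [Function.comp, gv]
    constructor
    · intro v; exact hcnt v
    · show ((PySem.List.pyRange (2 + (K:Int) + 1) (nums.length:Int) 1).foldl (fun ans d =>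
          ans + ((bstep nums st (2 + (K:Int))).1).getD
            (PySem.List.pyGetD nums d 0 - PySem.List.pyGetD nums (2 + (K:Int)) 0) 0) st.2) = ansF nums (K+1)
      rw [PySem.List.foldl_add]
      rw [iha]
      unfold ansF
      rw [Finset.sum_range_succ]
      congr 1
      apply congrArg
      apply List.map_congr_left
      intro d _
      rw [hcnt]
      simp only [gv]

lemma B_eq_ansF (nums : List Int) :
    countQuadruplets_1_alt nums = ansF nums ((nums.length:Int) - 3).toNat := by
  unfold countQuadruplets_1_alt
  show ((PySem.List.pyRange 2 ((nums.length:Int)-1) 1).foldl (bstep nums) (PySem.Dict.empty, 0)).2 = _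
  rw [PySem.List.pyRange_one, List.foldl_map]
  rw [show ((nums.length:Int)-1-2) = (nums.length:Int)-3 by ring]
  exact (Bloop nums _).2

lemma ansF_eq_quadSum (nums : List Int) :
    ansF nums ((nums.length:Int) - 3).toNat = quadSum nums := by
  symm
  unfold quadSum ansF
  set n := nums.length with hn
  rw [sum_range_shift _ n (((n:Int) - 3).toNat) 2 (by intro k hk; omega) ?vanish]
  case vanish =>
    intro c hc hor
    refine Finset.sum_eq_zero fun d hd => Finset.sum_eq_zero fun b hb => Finset.sum_eq_zero fun a ha => ?_
    simp only [Finset.mem_range] at hd hb ha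
    rw [if_neg]
    rintro ⟨h1, h2, h3, -⟩
    omega
  apply Finset.sum_congr rfl
  intro k hk
  simp only [Finset.mem_range] at hk
  rw [sum_pyRange_ite _ (2 + (k:Int) + 1) (n:Int) n (by omega) (by omega)]
  apply Finset.sum_congr rfl
  intro d hd
  simp only [Finset.mem_range] at hd
  by_cases hcd : 2 + k < d
  · rw [if_pos ⟨by omega, by omega⟩]
    unfold pc
    rw [sum_range_trunc _ n (k+2) (by omega) ?btrunc]
    case btrunc =>
      intro b hb1 hb2
      refine Finset.sum_eq_zero fun a ha => ?_
      rw [if_neg]; rintro ⟨h1, h2, -⟩; omega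
    apply Finset.sum_congr rfl
    intro b hb
    simp only [Finset.mem_range] at hb
    rw [sum_range_trunc _ n b (by omega) ?atrunc]
    case atrunc =>
      intro a ha1 ha2
      rw [if_neg]; rintro ⟨h1, -⟩; omega
    apply Finset.sum_congr rfl
    intro a ha
    simp only [Finset.mem_range] at ha
    refine if_congr ?_ rfl rfl
    constructor
    · rintro ⟨-, -, -, hE⟩
      rw [eq_sub_iff_add_eq]
      rw [show ((2:Int) + (k:Int)) = ((2 + k : ℕ) : Int) by push_cast; ring]
      exact hE
    · intro hE
      rw [eq_sub_iff_add_eq, show ((2:Int) + (k:Int)) = ((2 + k : ℕ) : Int) by push_cast; ring] at hE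
      exact ⟨ha, by omega, hcd, hE⟩
  · rw [if_neg (by omega)]
    refine Finset.sum_eq_zero fun b hb => Finset.sum_eq_zero fun a ha => ?_
    rw [if_neg]; rintro ⟨-, -, h3, -⟩; omega

-- ===== VERDICT (by name: the statement is the Claim_ definition above) =====
theorem countQuadruplets_1_spec : Claim_equal_countQuadruplets_1 := by
  intro nums _
  unfold Spec_countQuadruplets_1
  rw [A_eq_quadSum, B_eq_ansF, ansF_eq_quadSum]
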